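-- pv_equiv track=rewrite | github.com/python/cpython | Tools/jit/example_trace_dump.py | short_loop_with_side_exits
-- ===== SOURCE A (Python) =====
-- def short_loop_with_side_exits(n):
--     t = 0
--     for i in range(n):
--         if t < 0:
--             break
--         t += 1
--         if t < 0:
--             break
--         t += 1
--         if t < 0:
--             break
--         t += 1
--         if t < 0:
--             break
--         t += 1
--         if t < 0:
--             break
--         t += 1
--     return t
-- ===== SOURCE B (Python) =====
-- def short_loop_with_side_exits(n):
--     return 5 * max(n, 0)
-- ===== Notes on version B (the rewrite author's own statement) =====
-- stated objective: simpler
-- what changed: Replaces the loop (which adds five per iteration; its side-exit branches are unreachable since the accumulator is always nonnegative) with the closed form five times max(n, zero).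
import Mathlib
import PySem

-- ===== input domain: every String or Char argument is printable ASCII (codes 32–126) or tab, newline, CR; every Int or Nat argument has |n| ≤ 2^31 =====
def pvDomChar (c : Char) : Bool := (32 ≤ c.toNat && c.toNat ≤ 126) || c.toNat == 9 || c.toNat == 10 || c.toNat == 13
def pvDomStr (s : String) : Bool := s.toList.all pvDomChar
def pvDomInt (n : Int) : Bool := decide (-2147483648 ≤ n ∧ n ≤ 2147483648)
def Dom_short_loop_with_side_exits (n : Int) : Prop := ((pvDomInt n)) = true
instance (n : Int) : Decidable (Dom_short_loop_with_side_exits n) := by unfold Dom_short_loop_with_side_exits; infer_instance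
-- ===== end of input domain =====

-- B replaces A's loop with the closed form (the side-exit branches are unreachable): simpler and O(1); proved equal on all Int inputs in Dom.
-- ===== PORT A =====
-- ===== PORT A =====
-- literal port of A: the for-loop over range(n) becomes recursion over pyRange 0 n 1,
-- with each `if t < 0: break` returning the current t (the break).
def pvLoopA : List Int → Int → Int
  | [], t => t
  | _ :: rest, t =>
    if t < 0 then t else
    let t := t + 1
    if t < 0 then t else
    let t := t + 1
    if t < 0 then t else
    let t := t + 1
    if t < 0 then t else
    let t := t + 1
    if t < 0 then t else
    let t := t + 1
    pvLoopA rest t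

def short_loop_with_side_exits (n : Int) : Int :=
  pvLoopA (PySem.List.pyRange 0 n 1) 0

-- ===== PORT B =====
-- B: closed form, no loop
def short_loop_with_side_exits_alt (n : Int) : Int := 5 * max n 0

-- ===== PRECONDITION & SPEC =====
def Spec_short_loop_with_side_exits (n : Int) (out : Int) : Prop := out = short_loop_with_side_exits_alt n
instance (n : Int) (out : Int) : Decidable (Spec_short_loop_with_side_exits n out) := by unfold Spec_short_loop_with_side_exits; infer_instance

-- ===== CLAIM (what is proved, stated in full; the proofs are below) =====
def Claim_equal_short_loop_with_side_exits : Prop := ∀ (n : Int), Dom_short_loop_with_side_exits n → Spec_short_loop_with_side_exits n (short_loop_with_side_exits n)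

-- ===== LEMMAS AND PROOFS =====
theorem pvLoopA_nonneg (l : List Int) (t : Int) (ht : 0 ≤ t) :
    pvLoopA l t = t + 5 * l.length := by
  induction l generalizing t with
  | nil => simp [pvLoopA]
  | cons x rest ih =>
    simp only [pvLoopA]
    repeat rw [if_neg (by omega)]
    rw [ih (t + 1 + 1 + 1 + 1 + 1) (by omega)]
    simp [List.length_cons]; ring

-- ===== VERDICT (by name: the statement is the Claim_ definition above) =====
theorem short_loop_with_side_exits_spec : Claim_equal_short_loop_with_side_exits := by
  intro n _
  unfold Spec_short_loop_with_side_exits short_loop_with_side_exits short_loop_with_side_exits_alt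
  rw [pvLoopA_nonneg _ 0 le_rfl, PySem.List.length_pyRange_one]
  omega
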